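-- pv_equiv track=rewrite | github.com/snjl/python_leetcode | 747. 至少是其他数字两倍的最大数.py | dominantIndex2
-- ===== SOURCE A (Python) =====
-- def dominantIndex2(nums) -> int:
--     max_num = max(nums)
--     max_i = nums.index(max_num)
--     for i in range(len(nums)):
--         if max_i == i:
--             continue
--         if max_num - 2 * nums[i] < 0:
--             return -1
--
--     return max_i
-- ===== SOURCE B (Python) =====
-- def dominantIndex2(nums) -> int:
--     best = None
--     best_i = 0
--     second = None
--     for i, x in enumerate(nums):
--         if best is None:
--             best, best_i = x, i
--         elif best < x:
--             best, second, best_i = x, best, i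
--         elif second is None or second < x:
--             second = x
--     if best is None:
--         raise ValueError("dominantIndex2() arg is an empty sequence")
--     if second is not None and best < 2 * second:
--         return -1
--     return best_i
-- ===== Notes on version B (the rewrite author's own statement) =====
-- stated objective: alternative
-- what changed: Replaced A's three passes (max(nums), nums.index(max), then a verification scan over all indices) by a single pass that maintains the largest value, its first index and the second-largest value, deciding the result from that state.
import Mathlib
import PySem

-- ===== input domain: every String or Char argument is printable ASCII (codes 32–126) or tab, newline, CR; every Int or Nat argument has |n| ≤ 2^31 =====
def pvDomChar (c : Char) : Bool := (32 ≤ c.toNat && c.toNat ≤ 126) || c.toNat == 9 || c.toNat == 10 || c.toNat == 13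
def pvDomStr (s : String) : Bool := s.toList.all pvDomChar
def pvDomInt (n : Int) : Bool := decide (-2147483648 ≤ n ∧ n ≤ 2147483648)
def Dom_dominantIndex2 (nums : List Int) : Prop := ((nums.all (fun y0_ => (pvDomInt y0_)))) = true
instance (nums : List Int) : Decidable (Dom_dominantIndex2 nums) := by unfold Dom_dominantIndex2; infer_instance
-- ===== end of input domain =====

-- B replaces A's three passes (max, index-of-max, verification scan) by a single pass
-- tracking the largest value, its first index and the second-largest value (objective: alternative).

-- ===== PORT A =====
-- the for-loop over range(len(nums)) with its early 'return -1'
def dominantIndex2Loop (nums : List Int) (m mi : Int) : List Int → Int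
  | [] => mi
  | i :: rest =>
    if mi = i then dominantIndex2Loop nums m mi rest
    else if m - 2 * PySem.List.pyGetD nums i 0 < 0 then -1
    else dominantIndex2Loop nums m mi rest

def dominantIndex2 (nums : List Int) : Int :=
  match PySem.List.max? nums (fun x => x) with
  | none => 0   -- max([]) raises ValueError; excluded by Pre_
  | some m =>
    let mi : Int := ((PySem.List.index? nums m).getD 0 : Nat)
    dominantIndex2Loop nums m mi (PySem.List.pyRange 0 nums.length 1)

-- ===== PORT B =====
-- the single pass over enumerate(nums) with state (best, best_i, second)
def dominantIndex2AltLoop : List (Int × Int) → Option Int → Int → Option Int → Option Int × Int × Option Int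
  | [], best, besti, second => (best, besti, second)
  | (i, x) :: rest, best, besti, second =>
    match best with
    | none => dominantIndex2AltLoop rest (some x) i second
    | some b =>
      if b < x then dominantIndex2AltLoop rest (some x) i (some b)
      else
        match second with
        | none => dominantIndex2AltLoop rest (some b) besti (some x)
        | some s =>
          if s < x then dominantIndex2AltLoop rest (some b) besti (some x)
          else dominantIndex2AltLoop rest (some b) besti (some s)

def dominantIndex2_alt (nums : List Int) : Int :=
  match dominantIndex2AltLoop (PySem.List.enumerate nums 0) none 0 none with
  | (none, _, _) => 0   -- empty input: B raises ValueError; excluded by Pre_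
  | (some _, bi, none) => bi
  | (some b, bi, some s) => if b < 2 * s then -1 else bi

-- ===== PRECONDITION & SPEC =====
-- Pre_ excludes only the empty list, on which both Pythons raise ValueError.
def Pre_dominantIndex2 (nums : List Int) : Prop := nums ≠ []
instance (nums : List Int) : Decidable (Pre_dominantIndex2 nums) := by unfold Pre_dominantIndex2; infer_instance
def pvWitness_dominantIndex2 : List Int := [3, 1]

def Spec_dominantIndex2 (nums : List Int) (out : Int) : Prop := out = dominantIndex2_alt nums
instance (nums : List Int) (out : Int) : Decidable (Spec_dominantIndex2 nums out) := by unfold Spec_dominantIndex2; infer_instance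

-- ===== CLAIM (what is proved, stated in full; the proofs are below) =====
def Claim_equal_dominantIndex2 : Prop := ∀ (nums : List Int), Dom_dominantIndex2 nums → Pre_dominantIndex2 nums → Spec_dominantIndex2 nums (dominantIndex2 nums)

-- ===== LEMMAS AND PROOFS =====

-- invariant of B's loop state after consuming the prefix p:
-- best is the max of p, best_i its first index, second the max of p without that occurrence
def BInv (p : List Int) (b : Int) (bi : Nat) (second : Option Int) : Prop :=
  b ∈ p ∧ (∀ y ∈ p, y ≤ b) ∧ PySem.List.index? p b = some bi ∧ second = (p.eraseIdx bi).max?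

theorem max?_append_singleton (l : List Int) (x : Int) :
    (l ++ [x]).max? = some (match l.max? with | none => x | some s => max s x) := by
  induction l with
  | nil => simp
  | cons h t ih => cases ht : t.max? <;> simp_all

def updSecond (second : Option Int) (x : Int) : Option Int :=
  match second with | none => some x | some s => if s < x then some x else some s

theorem BInv_step_gt (p : List Int) (b : Int) (bi : Nat) (second : Option Int)
    (h : BInv p b bi second) (x : Int) (hx : b < x) :
    BInv (p ++ [x]) x p.length (some b) := by
  obtain ⟨hmem, hmax, hidx, hsec⟩ := h
  have hnotin : x ∉ p := fun hin => absurd (hmax x hin) (by omega)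
  refine ⟨by simp, ?_, PySem.List.index?_append_singleton_self p x hnotin, ?_⟩
  · intro y hy
    rcases List.mem_append.1 hy with hy | hy
    · exact le_of_lt (lt_of_le_of_lt (hmax y hy) hx)
    · simp_all
  · rw [List.eraseIdx_append_of_length_le (le_refl p.length)]
    have hp : p ++ [x].eraseIdx (p.length - p.length) = p := by simp
    rw [hp]
    exact (List.max?_eq_some_iff.2 ⟨hmem, hmax⟩).symm

theorem BInv_step_le (p : List Int) (b : Int) (bi : Nat) (second : Option Int)
    (h : BInv p b bi second) (x : Int) (hx : x ≤ b) :
    BInv (p ++ [x]) b bi (updSecond second x) := by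
  obtain ⟨hmem, hmax, hidx, hsec⟩ := h
  obtain ⟨hbi, -, -⟩ := PySem.List.getElem_of_index?_eq_some hidx
  refine ⟨List.mem_append_left _ hmem, ?_, by rw [PySem.List.index?_append_of_mem _ hmem]; exact hidx, ?_⟩
  · intro y hy
    rcases List.mem_append.1 hy with hy | hy
    · exact hmax y hy
    · simp_all
  · subst hsec
    rw [List.eraseIdx_append_of_lt_length hbi, max?_append_singleton]
    cases hm : (p.eraseIdx bi).max? with
    | none => simp [updSecond]
    | some s =>
      by_cases hsx : s < x
      · simp [updSecond, hsx, max_eq_right (le_of_lt hsx)]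
      · have hmx : max s x = s := max_eq_left (by omega)
        simp [updSecond, hsx, hmx]

theorem loopB_inv (xs : List Int) : ∀ (p : List Int) (b : Int) (bi : Nat) (second : Option Int),
    BInv p b bi second →
    ∃ b' bi' second', dominantIndex2AltLoop (PySem.List.enumerate xs (p.length)) (some b) ((bi : Nat) : Int) second
        = (some b', ((bi' : Nat) : Int), second') ∧ BInv (p ++ xs) b' bi' second' := by
  induction xs with
  | nil =>
    intro p b bi second h
    exact ⟨b, bi, second, by simp [PySem.List.enumerate, dominantIndex2AltLoop], by simpa using h⟩
  | cons x xs ih =>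
    intro p b bi second h
    rw [PySem.List.enumerate_cons]
    have hlen : (((p ++ [x]).length : Nat) : Int) = (p.length : Int) + 1 := by
      push_cast [List.length_append, List.length_singleton]; omega
    by_cases hbx : b < x
    · have hstep := BInv_step_gt p b bi second h x hbx
      obtain ⟨b', bi', s', heq, hinv⟩ := ih (p ++ [x]) x p.length (some b) hstep
      rw [hlen] at heq
      refine ⟨b', bi', s', ?_, by simpa [List.append_assoc] using hinv⟩
      simp only [dominantIndex2AltLoop, if_pos hbx]
      exact heq
    · have hstep := BInv_step_le p b bi second h x (by omega)
      obtain ⟨b', bi', s', heq, hinv⟩ := ih (p ++ [x]) b bi (updSecond second x) hstep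
      rw [hlen] at heq
      refine ⟨b', bi', s', ?_, by simpa [List.append_assoc] using hinv⟩
      cases second with
      | none =>
        simp only [updSecond] at heq
        simp only [dominantIndex2AltLoop, if_neg hbx]
        exact heq
      | some s =>
        simp only [updSecond] at heq
        by_cases hsx : s < x
        · rw [if_pos hsx] at heq
          simp only [dominantIndex2AltLoop, if_neg hbx, if_pos hsx]
          exact heq
        · rw [if_neg hsx] at heq
          simp only [dominantIndex2AltLoop, if_neg hbx, if_neg hsx]
          exact heq

theorem alt_char (nums : List Int) (hne : nums ≠ []) :
    ∃ b bi second, BInv nums b bi second ∧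
      dominantIndex2_alt nums = (match second with
        | none => ((bi : Nat) : Int)
        | some s => if b < 2 * s then -1 else ((bi : Nat) : Int)) := by
  cases nums with
  | nil => exact absurd rfl hne
  | cons x t =>
    have hinv0 : BInv [x] x 0 none := by
      refine ⟨by simp, by simp, ?_, by simp⟩
      exact PySem.List.index?_cons_self x []
    obtain ⟨b, bi, s, heq, hinv⟩ := loopB_inv t [x] x 0 none hinv0
    refine ⟨b, bi, s, by simpa using hinv, ?_⟩
    unfold dominantIndex2_alt
    rw [PySem.List.enumerate_cons]
    simp only [dominantIndex2AltLoop]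
    have h1 : ((([x] : List Int).length : Nat) : Int) = 0 + 1 := by simp
    rw [h1, Nat.cast_zero] at heq
    rw [heq]
    cases s <;> simp

theorem loopA_char (nums : List Int) (m mi : Int) (L : List Int) :
    dominantIndex2Loop nums m mi L =
      if ∀ j ∈ L, j ≠ mi → 2 * PySem.List.pyGetD nums j 0 ≤ m then mi else -1 := by
  induction L with
  | nil => simp [dominantIndex2Loop]
  | cons i rest ih =>
    by_cases hmi : mi = i
    · simp only [dominantIndex2Loop, if_pos hmi, ih]
      by_cases hc : ∀ j ∈ rest, j ≠ mi → 2 * PySem.List.pyGetD nums j 0 ≤ m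
      · rw [if_pos hc, if_pos]
        intro j hj hne
        rcases List.mem_cons.1 hj with rfl | hj
        · exact absurd hmi.symm hne
        · exact hc j hj hne
      · rw [if_neg hc, if_neg]
        intro hall
        exact hc fun j hj hne => hall j (List.mem_cons_of_mem i hj) hne
    · simp only [dominantIndex2Loop, if_neg hmi]
      by_cases hviol : m - 2 * PySem.List.pyGetD nums i 0 < 0
      · rw [if_pos hviol, if_neg]
        intro hall
        have := hall i (List.mem_cons_self) (fun h => hmi h.symm)
        omega
      · rw [if_neg hviol, ih]
        by_cases hc : ∀ j ∈ rest, j ≠ mi → 2 * PySem.List.pyGetD nums j 0 ≤ m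
        · rw [if_pos hc, if_pos]
          intro j hj hne
          rcases List.mem_cons.1 hj with rfl | hj
          · omega
          · exact hc j hj hne
        · rw [if_neg hc, if_neg]
          intro hall
          exact hc fun j hj hne => hall j (List.mem_cons_of_mem i hj) hne

theorem getElem_mem_eraseIdx (l : List Int) (i k : Nat) (hk : k < l.length) (hi : i < l.length)
    (hne : k ≠ i) : l[k] ∈ l.eraseIdx i := by
  have hlen : (l.eraseIdx i).length = l.length - 1 := by
    rw [List.length_eraseIdx]; simp [hi]
  by_cases hki : k < i
  · have hk' : k < (l.eraseIdx i).length := by omega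
    have := List.getElem_eraseIdx (l := l) (i := i) (j := k) hk'
    rw [dif_pos hki] at this
    exact this ▸ List.getElem_mem hk'
  · have hik : i < k := by omega
    have hk' : k - 1 < (l.eraseIdx i).length := by omega
    have this2 : (l.eraseIdx i)[k - 1] = l[k] := by
      rw [List.getElem_eraseIdx, dif_neg (by omega)]
      have hkk : k - 1 + 1 = k := by omega
      simp [hkk]
    exact this2 ▸ List.getElem_mem hk'

theorem cond_iff (nums : List Int) (b : Int) (bi : Nat) (hbi : bi < nums.length) :
    (∀ j ∈ PySem.List.pyRange 0 (nums.length : Int) 1, j ≠ ((bi : Nat) : Int) →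
        2 * PySem.List.pyGetD nums j 0 ≤ b)
    ↔ ∀ y ∈ nums.eraseIdx bi, 2 * y ≤ b := by
  constructor
  · intro h y hy
    obtain ⟨k, hk, rfl⟩ := List.getElem_of_mem hy
    have hlen : (nums.eraseIdx bi).length = nums.length - 1 := by
      rw [List.length_eraseIdx]; simp [hbi]
    have hget := List.getElem_eraseIdx (l := nums) (i := bi) (j := k) hk
    by_cases hki : k < bi
    · rw [dif_pos hki] at hget
      have hkn : k < nums.length := by omega
      have := h (k : Int) (PySem.List.mem_pyRange_one.2 ⟨by omega, by omega⟩)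
        (by intro hh; omega)
      rwa [PySem.List.pyGetD_natCast, List.getD_eq_getElem nums 0 hkn, ← hget] at this
    · rw [dif_neg hki] at hget
      have hkn : k + 1 < nums.length := by omega
      have := h ((k + 1 : Nat) : Int) (PySem.List.mem_pyRange_one.2 ⟨by omega, by omega⟩)
        (by intro hh; omega)
      rwa [PySem.List.pyGetD_natCast, List.getD_eq_getElem nums 0 hkn, ← hget] at this
  · intro h j hj hne
    obtain ⟨hj0, hjlen⟩ := PySem.List.mem_pyRange_one.1 hj
    obtain ⟨k, rfl⟩ : ∃ k : Nat, j = (k : Int) := ⟨j.toNat, (Int.toNat_of_nonneg hj0).symm⟩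
    have hkn : k < nums.length := by exact_mod_cast hjlen
    have hkbi : k ≠ bi := fun hh => hne (by exact_mod_cast hh)
    rw [PySem.List.pyGetD_natCast, List.getD_eq_getElem nums 0 hkn]
    exact h _ (getElem_mem_eraseIdx nums bi k hkn hbi hkbi)

theorem final_eq (nums : List Int) (hne : nums ≠ []) : dominantIndex2 nums = dominantIndex2_alt nums := by
  obtain ⟨b, bi, s, ⟨hbmem, hbmax, hidx, hsec⟩, halt⟩ := alt_char nums hne
  obtain ⟨hbi, -, -⟩ := PySem.List.getElem_of_index?_eq_some hidx
  cases hM : PySem.List.max? nums (fun x => x) with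
  | none => exact absurd ((PySem.List.max?_eq_none_iff nums _).1 hM) hne
  | some m =>
    have hmb : m = b := le_antisymm (hbmax m (PySem.List.max?_mem hM)) (PySem.List.max?_isMax hM b hbmem)
    subst hmb
    unfold dominantIndex2
    rw [hM]
    simp only [hidx, Option.getD_some]
    rw [loopA_char]
    rw [if_congr (cond_iff nums m bi hbi) rfl rfl]
    cases s with
    | none =>
      have halt' : dominantIndex2_alt nums = ((bi : Nat) : Int) := halt
      rw [halt']
      have hnil := (List.max?_eq_none_iff).1 hsec.symm
      rw [if_pos (by rw [hnil]; intro y hy; simp at hy)]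
    | some s2 =>
      have halt' : dominantIndex2_alt nums = if m < 2 * s2 then -1 else ((bi : Nat) : Int) := halt
      rw [halt']
      have hs2 := List.max?_eq_some_iff.1 hsec.symm
      by_cases hcond : ∀ y ∈ nums.eraseIdx bi, 2 * y ≤ m
      · rw [if_pos hcond, if_neg (by have := hcond s2 hs2.1; omega)]
      · rw [if_neg hcond, if_pos]
        rcases not_forall.1 hcond with ⟨y, hy⟩
        rcases _root_.not_imp.1 hy with ⟨hymem, hylt⟩
        have := hs2.2 y hymem
        omega

-- ===== VERDICT (by name: the statement is the Claim_ definition above) =====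
theorem dominantIndex2_spec : Claim_equal_dominantIndex2 := by
  intro nums _ hpre
  exact final_eq nums hpre
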